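-- pv_equiv track=rewrite | github.com/alang321/jetson_fisheye_calibration | asymm_circle_fisheye.py | rotate_hex_grid
-- ===== SOURCE A (Python) =====
-- from typing import List, Dict, Set, Tuple, Optional
--
-- def rotate_hex_grid(
--     grid_points: Set[Tuple[int, int]],
--     steps: int
-- ) -> Set[Tuple[int, int]]:
--     """
--     Rotates a set of hexagonal grid points by a multiple of 60 degrees.
--
--     This function uses an axial coordinate system for input/output and temporarily
--     converts to a cube coordinate system for rotation, which simplifies the math.
--
--     Args:
--         grid_points: A set of tuples, where each tuple is a (q, r) axial coordinate.
--                      In our case, this will be the (r, c) keys from your grid_map.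
--         steps: The number of 60-degree clockwise rotations to perform.
--                For example, steps=1 is a 60-degree rotation, steps=3 is 180 degrees.
--
--     Returns:
--         A new set of tuples representing the rotated (q, r) coordinates.
--     """
--     rotated_points = set()
--
--     # Normalize steps to be within 0-5 range
--     steps = steps % 6
--
--     for q, r in grid_points:
--         # 1. Convert axial (q, r) to cube (x, y, z) coordinates
--         # In a cube system for a hex grid, x + y + z always equals 0.
--         x = q
--         z = r
--         y = -x - z
--
--         # 2. Perform rotation by shuffling cube coordinates
--         # A 60-degree clockwise rotation is equivalent to shifting the cube coordinates.
--         for _ in range(steps):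
--             x, y, z = -z, -x, -y
--
--         # 3. Convert back from cube to axial coordinates for the output
--         new_q = x
--         new_r = z
--         rotated_points.add((new_q, new_r))
--
--     return rotated_points
-- ===== SOURCE B (Python) =====
-- def rotate_hex_grid(grid_points, steps):
--     """Rotate axial hex points by steps*60 deg clockwise via one precomputed linear map."""
--     # Compose the single-step axial map (q, r) -> (-r, q + r) exactly steps % 6 times,
--     # yielding fixed coefficients (a, b, c, d) of the net rotation matrix.
--     a, b, c, d = 1, 0, 0, 1
--     for _ in range(steps % 6):
--         a, b, c, d = -c, -d, a + c, b + d
--     return {(a * q + b * r, c * q + d * r) for q, r in grid_points}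
-- ===== Notes on version B (the rewrite author's own statement) =====
-- stated objective: simpler
-- what changed: B precomputes the net rotation as a fixed 2x2 axial coefficient matrix (composing the single-step map steps%6 times once per call) and applies that closed-form linear map in a single pass, instead of converting each point to cube coordinates and iterating the coordinate shuffle steps%6 times per point.
import Mathlib
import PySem

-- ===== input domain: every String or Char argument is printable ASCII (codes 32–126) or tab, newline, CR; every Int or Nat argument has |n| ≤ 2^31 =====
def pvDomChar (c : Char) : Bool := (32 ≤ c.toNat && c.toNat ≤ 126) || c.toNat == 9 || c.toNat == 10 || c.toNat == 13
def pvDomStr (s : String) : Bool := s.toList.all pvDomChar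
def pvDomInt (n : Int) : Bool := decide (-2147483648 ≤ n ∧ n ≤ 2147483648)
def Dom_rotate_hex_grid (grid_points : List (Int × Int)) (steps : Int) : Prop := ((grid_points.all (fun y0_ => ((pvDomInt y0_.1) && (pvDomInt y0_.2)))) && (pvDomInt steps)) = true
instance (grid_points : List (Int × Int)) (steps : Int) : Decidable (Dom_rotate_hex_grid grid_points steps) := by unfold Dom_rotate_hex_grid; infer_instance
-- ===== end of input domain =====

-- ===== PORT A =====
-- Literal port of A: per point, convert to cube coords and rotate by shuffling steps%6 times.
def rotate_hex_grid (grid_points : List (Int × Int)) (steps : Int) : List (Int × Int) :=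
  let steps2 : Int := PySem.Int.mod steps 6
  grid_points.foldl (fun rotated p =>
    let x : Int := p.1
    let z : Int := p.2
    let y : Int := -x - z
    let t := (PySem.List.pyRange 0 steps2 1).foldl
      (fun (t : Int × Int × Int) _ => (-t.2.2, -t.1, -t.2.1)) (x, y, z)
    PySem.Set.add rotated (t.1, t.2.2)) PySem.Set.empty

-- ===== PORT B =====
-- Port of B: compose the one-step axial map steps%6 times into coefficients (a,b,c,d), one pass.
def rotate_hex_grid_alt (grid_points : List (Int × Int)) (steps : Int) : List (Int × Int) :=
  let m := (PySem.List.pyRange 0 (PySem.Int.mod steps 6) 1).foldl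
    (fun (m : Int × Int × Int × Int) _ => (-m.2.2.1, -m.2.2.2, m.1 + m.2.2.1, m.2.1 + m.2.2.2))
    (1, 0, 0, 1)
  PySem.Set.ofList (grid_points.map (fun p =>
    (m.1 * p.1 + m.2.1 * p.2, m.2.2.1 * p.1 + m.2.2.2 * p.2)))

-- ===== PRECONDITION & SPEC =====
def Spec_rotate_hex_grid (grid_points : List (Int × Int)) (steps : Int) (out : List (Int × Int)) : Prop := out = rotate_hex_grid_alt grid_points steps
instance (grid_points : List (Int × Int)) (steps : Int) (out : List (Int × Int)) : Decidable (Spec_rotate_hex_grid grid_points steps out) := by unfold Spec_rotate_hex_grid; infer_instance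

-- ===== CLAIM (what is proved, stated in full; the proofs are below) =====
def Claim_equal_rotate_hex_grid : Prop := ∀ (grid_points : List (Int × Int)) (steps : Int), Dom_rotate_hex_grid grid_points steps → Spec_rotate_hex_grid grid_points steps (rotate_hex_grid grid_points steps)

-- ===== LEMMAS AND PROOFS =====

-- A's foldl-with-add from the empty set over transformed points IS Set.ofList of the mapped list.
theorem foldl_add_eq_ofList_map (xs : List (Int × Int)) (f : Int × Int → Int × Int) :
    xs.foldl (fun s p => PySem.Set.add s (f p)) PySem.Set.empty
      = PySem.Set.ofList (xs.map f) := by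
  rw [PySem.Set.ofList_eq_foldl, List.foldl_map]
  rfl

-- foldl of add is stable under pointwise-equal transforms.
theorem foldl_add_congr (xs : List (Int × Int)) (f g : Int × Int → Int × Int)
    (h : ∀ p, f p = g p) (s : List (Int × Int)) :
    xs.foldl (fun s p => PySem.Set.add s (f p)) s
      = xs.foldl (fun s p => PySem.Set.add s (g p)) s := by
  induction xs generalizing s with
  | nil => rfl
  | cons x xs ih => rw [List.foldl_cons, List.foldl_cons, h]; exact ih _

-- Invariant tying A's per-point cube shuffle to B's coefficient composition:
-- if the triple is (a q + b r, -(…)-(…), c q + d r), one shuffle step matches one coefficient step.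
theorem shuffle_coeff_inv (l : List Int) (q r a b c d : Int) :
    l.foldl (fun (t : Int × Int × Int) _ => (-t.2.2, -t.1, -t.2.1))
      (a*q+b*r, -(a*q+b*r)-(c*q+d*r), c*q+d*r)
    = (fun (m : Int × Int × Int × Int) =>
        (m.1*q+m.2.1*r, -(m.1*q+m.2.1*r)-(m.2.2.1*q+m.2.2.2*r), m.2.2.1*q+m.2.2.2*r))
      (l.foldl (fun (m : Int × Int × Int × Int) _ =>
        (-m.2.2.1, -m.2.2.2, m.1 + m.2.2.1, m.2.1 + m.2.2.2)) (a, b, c, d)) := by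
  induction l generalizing a b c d with
  | nil => rfl
  | cons x l ih =>
    simp only [List.foldl_cons]
    have hstep : ((-(c*q+d*r), -(a*q+b*r), -(-(a*q+b*r)-(c*q+d*r))) : Int × Int × Int)
        = ((-c)*q+(-d)*r, -((-c)*q+(-d)*r)-((a+c)*q+(b+d)*r), (a+c)*q+(b+d)*r) := by
      refine Prod.ext (by ring) (Prod.ext (by ring) (by ring))
    rw [hstep]
    exact ih (-c) (-d) (a+c) (b+d)

-- The two per-point transforms agree.
theorem point_eq (steps : Int) (p : Int × Int) :
    (let t := (PySem.List.pyRange 0 (PySem.Int.mod steps 6) 1).foldl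
        (fun (t : Int × Int × Int) _ => (-t.2.2, -t.1, -t.2.1)) (p.1, -p.1 - p.2, p.2)
     ((t.1, t.2.2) : Int × Int))
    = (let m := (PySem.List.pyRange 0 (PySem.Int.mod steps 6) 1).foldl
        (fun (m : Int × Int × Int × Int) _ =>
          (-m.2.2.1, -m.2.2.2, m.1 + m.2.2.1, m.2.1 + m.2.2.2)) (1, 0, 0, 1)
       (m.1 * p.1 + m.2.1 * p.2, m.2.2.1 * p.1 + m.2.2.2 * p.2)) := by
  obtain ⟨q, r⟩ := p
  have hinit : ((q, -q - r, r) : Int × Int × Int)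
      = (1*q+0*r, -(1*q+0*r)-(0*q+1*r), 0*q+1*r) := by
    refine Prod.ext (by ring) (Prod.ext (by ring) (by ring))
  simp only [hinit, shuffle_coeff_inv]

-- ===== VERDICT (by name: the statement is the Claim_ definition above) =====
theorem rotate_hex_grid_spec : Claim_equal_rotate_hex_grid := by
  intro gp steps _
  show rotate_hex_grid gp steps = rotate_hex_grid_alt gp steps
  exact (foldl_add_congr gp _ _ (point_eq steps) PySem.Set.empty).trans
    (foldl_add_eq_ofList_map gp _)
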